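-- pv_equiv track=rewrite | github.com/SilentStorm2k/advent_of_code | 2023/15.py | hashVal
-- ===== SOURCE A (Python) =====
-- def hashVal(seq, p1):
--     val = 0
--     for s in list(seq):
--         if not p1:
--             if s == '=' or s == '-':
--                 break
--         val += ord(s)
--         val *= 17
--         val %= 256
--     return val
-- ===== SOURCE B (Python) =====
-- def hashVal(seq, p1):
--     if p1:
--         s = seq
--     else:
--         i = next((i for i, c in enumerate(seq) if c in '=-'), len(seq))
--         s = seq[:i]
--     n = len(s)
--     return sum(ord(c) * pow(17, n - i, 256) for i, c in enumerate(s)) % 256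
-- ===== Notes on version B (the rewrite author's own statement) =====
-- stated objective: alternative
-- what changed: Replaced A's sequential break-loop fold by a closed-form computation: find the stop index, then return the weighted sum of ord(c)*17^(n-i) mod 256 over the kept prefix, using the algebraic expansion of the affine recurrence.
import Mathlib
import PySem

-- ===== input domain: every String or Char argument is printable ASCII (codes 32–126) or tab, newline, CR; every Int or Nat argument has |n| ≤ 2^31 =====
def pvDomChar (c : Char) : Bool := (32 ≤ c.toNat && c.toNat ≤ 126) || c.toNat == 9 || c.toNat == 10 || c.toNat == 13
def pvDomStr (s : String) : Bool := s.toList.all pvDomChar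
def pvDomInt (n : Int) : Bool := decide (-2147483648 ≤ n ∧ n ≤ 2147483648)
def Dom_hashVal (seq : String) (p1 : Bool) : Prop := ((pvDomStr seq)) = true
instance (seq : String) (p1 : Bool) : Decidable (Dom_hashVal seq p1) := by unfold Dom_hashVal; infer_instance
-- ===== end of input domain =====

-- B replaces A's sequential break-loop fold by a closed form: stop-prefix selection, then
-- the weighted sum Σ ord(c)*17^(n-i) mod 256 (the expanded affine recurrence); same cost.
-- ===== PORT A =====
-- A's loop with break, as structural recursion carrying val
def hashValLoop (l : List Char) (p1 : Bool) (val : Int) : Int :=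
  match l with
  | [] => val
  | s :: rest =>
    if !p1 && (s == '=' || s == '-') then val
    else hashValLoop rest p1 (PySem.Int.mod ((val + s.toNat) * 17) 256)

def hashVal (seq : String) (p1 : Bool) : Int :=
  hashValLoop seq.toList p1 0

-- ===== PORT B =====
-- Source B: find the first stop index (len if none), slice the prefix, then the weighted sum.
def hashVal_alt (seq : String) (p1 : Bool) : Int :=
  let cs := seq.toList
  -- next((i for i, c in enumerate(seq) if c in '=-'), len(seq)); findIdx is len if absent
  let s := if p1 then cs else cs.take (cs.findIdx (fun c => c == '=' || c == '-'))
  let n := s.length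
  PySem.Int.mod
    ((s.zipIdx.map (fun p => (p.1.toNat : Int) * PySem.Int.mod ((17 : Int) ^ (n - p.2)) 256)).sum)
    256

-- ===== PRECONDITION & SPEC =====
def Spec_hashVal (seq : String) (p1 : Bool) (out : Int) : Prop := out = hashVal_alt seq p1
instance (seq : String) (p1 : Bool) (out : Int) : Decidable (Spec_hashVal seq p1 out) := by unfold Spec_hashVal; infer_instance

-- ===== CLAIM (what is proved, stated in full; the proofs are below) =====
def Claim_equal_hashVal : Prop := ∀ (seq : String) (p1 : Bool), Dom_hashVal seq p1 → Spec_hashVal seq p1 (hashVal seq p1)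

-- ===== LEMMAS AND PROOFS =====

-- the weighted sum of B over a character list
def pvW (l : List Char) : Int :=
  (l.zipIdx.map (fun p => (p.1.toNat : Int) * PySem.Int.mod ((17 : Int) ^ (l.length - p.2)) 256)).sum

theorem pvW_cons (c : Char) (l : List Char) :
    pvW (c :: l) = (c.toNat : Int) * PySem.Int.mod ((17 : Int) ^ (l.length + 1)) 256 + pvW l := by
  simp [pvW, List.zipIdx_cons, List.zipIdx_succ, List.map_map, Function.comp_def, Nat.add_sub_add_right]

-- A's loop, started at a reduced value v, equals (v·17^|l| + W l) mod 256 when it never breaks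
theorem loop_eq_closed (l : List Char) (p1 : Bool) (v : Int)
    (hv : 0 ≤ v ∧ v < 256)
    (hstop : p1 = true ∨ ∀ c ∈ l, ¬(c == '=' || c == '-') = true) :
    hashValLoop l p1 v = (v * 17 ^ l.length + pvW l) % 256 := by
  induction l generalizing v with
  | nil =>
    simp [hashValLoop, pvW]
    omega
  | cons c rest ih =>
    have hnb : (!p1 && (c == '=' || c == '-')) = false := by
      rcases hstop with h | h
      · simp [h]
      · simp [h c (by simp)]
    have hstep : hashValLoop (c :: rest) p1 v =
        hashValLoop rest p1 (PySem.Int.mod ((v + c.toNat) * 17) 256) := by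
      simp [hashValLoop, hnb]
    have hb : (0 : Int) < 256 := by norm_num
    have hmm : PySem.Int.mod ((v + c.toNat) * 17) 256 = ((v + c.toNat) * 17) % 256 :=
      PySem.Int.mod_eq_emod_of_pos hb
    have hv' : 0 ≤ ((v + c.toNat) * 17) % 256 ∧ ((v + c.toNat) * 17) % 256 < 256 :=
      ⟨Int.emod_nonneg _ (by norm_num), Int.emod_lt_of_pos _ hb⟩
    have hstop' : p1 = true ∨ ∀ x ∈ rest, ¬(x == '=' || x == '-') = true := by
      rcases hstop with h | h
      · exact Or.inl h
      · exact Or.inr fun x hx => h x (by simp [hx])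
    rw [hstep, hmm, ih _ hv' hstop', pvW_cons]
    have hpow : PySem.Int.mod ((17 : Int) ^ (rest.length + 1)) 256 =
        ((17 : Int) ^ (rest.length + 1)) % 256 := PySem.Int.mod_eq_emod_of_pos hb
    rw [hpow]
    -- both sides mod 256: drop the inner mods via ModEq, then compare polynomials
    have e1 : Int.ModEq 256 ((v + (c.toNat : Int)) * 17 % 256 * 17 ^ rest.length + pvW rest)
        ((v + (c.toNat : Int)) * 17 * 17 ^ rest.length + pvW rest) :=
      Int.ModEq.add_right _ (Int.ModEq.mul_right _ (Int.emod_emod_of_dvd _ dvd_rfl))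
    have e2 : Int.ModEq 256
        (v * 17 ^ (rest.length + 1) + ((c.toNat : Int) * ((17 : Int) ^ (rest.length + 1) % 256) + pvW rest))
        (v * 17 ^ (rest.length + 1) + ((c.toNat : Int) * (17 : Int) ^ (rest.length + 1) + pvW rest)) :=
      Int.ModEq.add_left _ (Int.ModEq.add_right _ (Int.ModEq.mul_left _ (Int.emod_emod_of_dvd _ dvd_rfl)))
    calc ((v + (c.toNat : Int)) * 17 % 256 * 17 ^ rest.length + pvW rest) % 256
        = ((v + (c.toNat : Int)) * 17 * 17 ^ rest.length + pvW rest) % 256 := e1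
      _ = (v * 17 ^ (rest.length + 1) + ((c.toNat : Int) * (17 : Int) ^ (rest.length + 1) + pvW rest)) % 256 := by
          ring_nf
      _ = (v * 17 ^ (rest.length + 1) + ((c.toNat : Int) * ((17 : Int) ^ (rest.length + 1) % 256) + pvW rest)) % 256 := e2.symm

-- seq[:findIdx stop] = takeWhile (not stop)
theorem take_findIdx_eq_takeWhile (l : List Char) (p : Char → Bool) :
    l.take (l.findIdx p) = l.takeWhile (fun c => !(p c)) := by
  induction l with
  | nil => simp
  | cons c rest ih =>
    by_cases h : p c = true
    · simp [List.findIdx_cons, h, List.takeWhile]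
    · simp [List.findIdx_cons, h, List.takeWhile, ih]

-- A's loop with break = the loop without break over the kept prefix
theorem loop_false_eq_prefix (l : List Char) (v : Int) :
    hashValLoop l false v =
      hashValLoop (l.takeWhile (fun c => !(c == '=' || c == '-'))) true v := by
  induction l generalizing v with
  | nil => simp [hashValLoop]
  | cons c rest ih =>
    by_cases h : (c == '=' || c == '-') = true
    · simp [hashValLoop, h, List.takeWhile]
    · simp only [hashValLoop, List.takeWhile, h, Bool.not_false]
      simpa [h] using ih _

-- ===== VERDICT (by name: the statement is the Claim_ definition above) =====
theorem hashVal_spec : Claim_equal_hashVal := by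
  intro seq p1 _
  unfold Spec_hashVal hashVal hashVal_alt
  have hb : (0 : Int) < 256 := by norm_num
  cases p1 with
  | true =>
    rw [loop_eq_closed seq.toList true 0 (by norm_num) (Or.inl rfl)]
    simp [pvW]
  | false =>
    rw [loop_false_eq_prefix]
    rw [loop_eq_closed _ true 0 (by norm_num) (Or.inl rfl)]
    simp only [take_findIdx_eq_takeWhile]
    simp [pvW]
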